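-- pv_equiv track=rewrite | github.com/thepurpleowl/codequeries-benchmark | analyze_classified_spans.py | find_twostep_tag_aware_spans
-- ===== SOURCE A (Python) =====
-- from collections import namedtuple
--
-- def find_twostep_tag_aware_spans(labels_sequence, span_type='both'):
--     spans = set()
--     span_item = namedtuple('span_item', ['block_index', 'block_offset', 'tag'])
--
--     i = 0
--     while(i < len(labels_sequence)):
--         if(labels_sequence[i][0] == 0
--                 or labels_sequence[i][0] == 3):
--             if(labels_sequence[i][0] == 0):
--                 tag = 0
--             else:
--                 tag = 3
--
--             span = []
--             span.append(span_item(labels_sequence[i][1],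
--                                   labels_sequence[i][2],
--                                   tag))
--             i += 1
--
--             while(i < len(labels_sequence) and labels_sequence[i][0] == 1):
--                 span.append(span_item(labels_sequence[i][1],
--                                       labels_sequence[i][2],
--                                       tag))
--                 i += 1
--
--             t = tuple(span)
--             spans.add(t)
--         else:
--             i += 1
--
--     filtered_span = set()
--     if span_type == 'answer':
--         for span in spans:
--             if span[0].tag == 0:
--                 filtered_span.add(span)
--         return filtered_span
--     elif span_type == 'sf':
--         for span in spans:
--             if span[0].tag == 3:
--                 filtered_span.add(span)
--         return filtered_span
--     elif span_type == 'both':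
--         return spans
--     else:
--         raise ValueError("Unknown span type")
-- ===== SOURCE B (Python) =====
-- from collections import namedtuple
--
-- def find_twostep_tag_aware_spans(labels_sequence, span_type='both'):
--     span_item = namedtuple('span_item', ['block_index', 'block_offset', 'tag'])
--     if span_type == 'answer':
--         wanted = (0,)
--     elif span_type == 'sf':
--         wanted = (3,)
--     elif span_type == 'both':
--         wanted = (0, 3)
--     else:
--         raise ValueError("Unknown span type")
--
--     result = set()
--     cur = None  # (tag, [span_item, ...]) of the span in progress, or None
--
--     def finalize():
--         nonlocal cur
--         if cur is not None:
--             tag, items = cur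
--             if tag in wanted:
--                 result.add(tuple(items))
--             cur = None
--
--     for first, bi, bo in labels_sequence:
--         if first == 0 or first == 3:
--             finalize()
--             tag = 0 if first == 0 else 3
--             cur = (tag, [span_item(bi, bo, tag)])
--         elif first == 1:
--             if cur is not None:
--                 cur[1].append(span_item(bi, bo, cur[0]))
--         else:
--             finalize()
--     finalize()
--     return result
-- ===== Notes on version B (the rewrite author's own statement) =====
-- stated objective: simpler
-- what changed: Replaces A's index-driven while loop with a nested inner while plus a separate second filter pass over the collected set by a single for-loop state machine (current span + tag) that validates span_type up front and adds a finalized span to the result only when its tag is wanted, fusing the filter into the scan.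
import Mathlib
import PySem

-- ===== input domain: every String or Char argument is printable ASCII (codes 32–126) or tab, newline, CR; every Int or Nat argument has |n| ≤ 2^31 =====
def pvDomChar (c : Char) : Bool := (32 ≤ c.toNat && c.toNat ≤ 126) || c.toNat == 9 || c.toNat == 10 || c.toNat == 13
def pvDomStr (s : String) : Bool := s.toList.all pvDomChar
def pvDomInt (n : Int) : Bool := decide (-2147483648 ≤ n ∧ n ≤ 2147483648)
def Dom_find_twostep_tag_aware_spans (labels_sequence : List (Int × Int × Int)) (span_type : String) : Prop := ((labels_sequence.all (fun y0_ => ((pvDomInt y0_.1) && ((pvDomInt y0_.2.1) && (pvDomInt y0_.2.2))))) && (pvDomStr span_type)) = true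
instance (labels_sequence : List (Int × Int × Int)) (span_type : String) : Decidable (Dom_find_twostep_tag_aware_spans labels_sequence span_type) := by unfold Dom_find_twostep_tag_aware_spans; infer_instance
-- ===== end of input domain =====

-- B fuses A's two phases (collect every span into a set, then filter it by tag in a second pass)
-- into one state-machine pass that validates span_type up front and only adds wanted spans (objective: simpler).

-- ===== PORT A =====

-- inner 'while i < len(labels_sequence) and labels_sequence[i][0] == 1':
-- returns (the span_items appended by the inner loop, the remaining suffix of the sequence)
def pvA_inner (tag : Int) : List (Int × Int × Int) → List (Int × Int × Int) × List (Int × Int × Int)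
  | [] => ([], [])
  | x :: rest =>
    if x.1 = 1 then
      let r := pvA_inner tag rest
      ((x.2.1, x.2.2, tag) :: r.1, r.2)
    else ([], x :: rest)

-- needed by the ports' termination proofs
theorem pvA_inner_len (tag : Int) (l : List (Int × Int × Int)) :
    (pvA_inner tag l).2.length ≤ l.length := by
  induction l with
  | nil => simp [pvA_inner]
  | cons x rest ih =>
    simp only [pvA_inner]
    split
    · exact Nat.le_succ_of_le ih
    · simp

-- outer 'while i < len(labels_sequence)' building the set 'spans'
def pvA_collect : List (Int × Int × Int) → PySem.Set (List (Int × Int × Int)) → PySem.Set (List (Int × Int × Int))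
  | [], spans => spans
  | x :: rest, spans =>
    if x.1 = 0 ∨ x.1 = 3 then
      let tag : Int := if x.1 = 0 then 0 else 3
      let r := pvA_inner tag rest
      pvA_collect r.2 (PySem.Set.add spans ((x.2.1, x.2.2, tag) :: r.1))
    else pvA_collect rest spans
termination_by l => l.length
decreasing_by
  · exact Nat.lt_succ_of_le (pvA_inner_len _ rest)
  · simp

def find_twostep_tag_aware_spans (labels_sequence : List (Int × Int × Int)) (span_type : String) : List (List (Int × Int × Int)) :=
  let spans := pvA_collect labels_sequence PySem.Set.empty
  if span_type = "answer" then
    -- 'for span in spans: if span[0].tag == 0: filtered_span.add(span)'; every collected span is nonempty, so span[0] is its head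
    spans.foldl (fun fs sp => if (sp.headD (0, 0, 0)).2.2 = 0 then PySem.Set.add fs sp else fs) PySem.Set.empty
  else if span_type = "sf" then
    spans.foldl (fun fs sp => if (sp.headD (0, 0, 0)).2.2 = 3 then PySem.Set.add fs sp else fs) PySem.Set.empty
  else if span_type = "both" then
    spans
  else [] -- 'raise ValueError("Unknown span type")' — excluded by Pre_

-- ===== PORT B =====

-- 'finalize()': flush the span in progress into the result set when its tag is wanted
def pvB_final (wanted : List Int) (res : PySem.Set (List (Int × Int × Int)))
    (cur : Option (Int × List (Int × Int × Int))) : PySem.Set (List (Int × Int × Int)) :=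
  match cur with
  | none => res
  | some (tag, items) => if wanted.contains tag then PySem.Set.add res items else res

-- the single 'for first, bi, bo in labels_sequence' loop; state = (result set, span in progress)
def pvB_loop (wanted : List Int) : List (Int × Int × Int) → PySem.Set (List (Int × Int × Int)) →
    Option (Int × List (Int × Int × Int)) → PySem.Set (List (Int × Int × Int))
  | [], res, cur => pvB_final wanted res cur
  | x :: rest, res, cur =>
    if x.1 = 0 ∨ x.1 = 3 then
      let tag : Int := if x.1 = 0 then 0 else 3
      pvB_loop wanted rest (pvB_final wanted res cur) (some (tag, [(x.2.1, x.2.2, tag)]))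
    else if x.1 = 1 then
      match cur with
      | none => pvB_loop wanted rest res none
      | some (tag, items) => pvB_loop wanted rest res (some (tag, items ++ [(x.2.1, x.2.2, tag)]))
    else pvB_loop wanted rest (pvB_final wanted res cur) none

def find_twostep_tag_aware_spans_alt (labels_sequence : List (Int × Int × Int)) (span_type : String) : List (List (Int × Int × Int)) :=
  if span_type = "answer" then pvB_loop [0] labels_sequence PySem.Set.empty none
  else if span_type = "sf" then pvB_loop [3] labels_sequence PySem.Set.empty none
  else if span_type = "both" then pvB_loop [0, 3] labels_sequence PySem.Set.empty none
  else [] -- 'raise ValueError("Unknown span type")' — excluded by Pre_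

-- ===== PRECONDITION & SPEC =====
-- Pre_ excludes exactly the unknown span_type values, on which A (and B) raise ValueError.
def Pre_find_twostep_tag_aware_spans (_labels_sequence : List (Int × Int × Int)) (span_type : String) : Prop :=
  span_type = "answer" ∨ span_type = "sf" ∨ span_type = "both"
instance (labels_sequence : List (Int × Int × Int)) (span_type : String) : Decidable (Pre_find_twostep_tag_aware_spans labels_sequence span_type) := by unfold Pre_find_twostep_tag_aware_spans; infer_instance

def pvWitness_find_twostep_tag_aware_spans : (List (Int × Int × Int)) × String :=
  ([(0, 1, 2), (1, 3, 4), (2, 0, 0), (3, 5, 6), (1, 7, 8), (0, 1, 2), (1, 3, 4)], "both")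

def Spec_find_twostep_tag_aware_spans (labels_sequence : List (Int × Int × Int)) (span_type : String) (out : List (List (Int × Int × Int))) : Prop := out = find_twostep_tag_aware_spans_alt labels_sequence span_type
instance (labels_sequence : List (Int × Int × Int)) (span_type : String) (out : List (List (Int × Int × Int))) : Decidable (Spec_find_twostep_tag_aware_spans labels_sequence span_type out) := by unfold Spec_find_twostep_tag_aware_spans; infer_instance

-- ===== CLAIM (what is proved, stated in full; the proofs are below) =====
def Claim_equal_find_twostep_tag_aware_spans : Prop := ∀ (labels_sequence : List (Int × Int × Int)) (span_type : String), Dom_find_twostep_tag_aware_spans labels_sequence span_type → Pre_find_twostep_tag_aware_spans labels_sequence span_type → Spec_find_twostep_tag_aware_spans labels_sequence span_type (find_twostep_tag_aware_spans labels_sequence span_type)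

-- ===== LEMMAS AND PROOFS =====

-- the stream of finalized spans, in order of occurrence (proof-only helper)
def pvRaw : List (Int × Int × Int) → List (List (Int × Int × Int))
  | [] => []
  | x :: rest =>
    if x.1 = 0 ∨ x.1 = 3 then
      let tag : Int := if x.1 = 0 then 0 else 3
      let r := pvA_inner tag rest
      ((x.2.1, x.2.2, tag) :: r.1) :: pvRaw r.2
    else pvRaw rest
termination_by l => l.length
decreasing_by
  · exact Nat.lt_succ_of_le (pvA_inner_len _ rest)
  · simp

-- 'add sp to the set only when p sp holds'
def pvAddIf (p : List (Int × Int × Int) → Bool) (s : PySem.Set (List (Int × Int × Int)))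
    (sp : List (Int × Int × Int)) : PySem.Set (List (Int × Int × Int)) :=
  if p sp then PySem.Set.add s sp else s

theorem pvA_collect_eq_raw (l : List (Int × Int × Int)) (s : PySem.Set (List (Int × Int × Int))) :
    pvA_collect l s = (pvRaw l).foldl PySem.Set.add s := by
  fun_induction pvA_collect l s with
  | case1 spans => simp [pvRaw]
  | case2 x rest spans h tag r ih =>
    rw [pvRaw, if_pos h]
    simpa using ih
  | case3 x rest spans h ih =>
    rw [pvRaw, if_neg h]
    exact ih

theorem pvB_loop_cons (wanted : List Int) (x : Int × Int × Int) (rest : List (Int × Int × Int))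
    (res : PySem.Set (List (Int × Int × Int))) (cur : Option (Int × List (Int × Int × Int))) :
    pvB_loop wanted (x :: rest) res cur =
      if x.1 = 0 ∨ x.1 = 3 then
        pvB_loop wanted rest (pvB_final wanted res cur)
          (some (if x.1 = 0 then (0 : Int) else 3, [(x.2.1, x.2.2, if x.1 = 0 then (0 : Int) else 3)]))
      else if x.1 = 1 then
        match cur with
        | none => pvB_loop wanted rest res none
        | some (tag, items) => pvB_loop wanted rest res (some (tag, items ++ [(x.2.1, x.2.2, tag)]))
      else pvB_loop wanted rest (pvB_final wanted res cur) none := by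
  cases cur with
  | none => rfl
  | some st => rfl

-- running B's loop with a span in progress = let it absorb the run of 1-labels, finalize, continue inactive
theorem pvB_loop_some (wanted : List Int) (rest : List (Int × Int × Int)) :
    ∀ (res : PySem.Set (List (Int × Int × Int))) (tag : Int) (items : List (Int × Int × Int)),
      items ≠ [] → ((items.headD (0, 0, 0)).2.2 = tag) →
      pvB_loop wanted rest res (some (tag, items)) =
        pvB_loop wanted (pvA_inner tag rest).2
          (pvAddIf (fun sp => wanted.contains (sp.headD (0, 0, 0)).2.2) res
            (items ++ (pvA_inner tag rest).1)) none := by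
  induction rest with
  | nil =>
    intro res tag items hne hh
    rw [← hh]
    simp [pvB_loop, pvB_final, pvA_inner, pvAddIf]
  | cons x r ih =>
    intro res tag items hne hh
    by_cases h1 : x.1 = 1
    · have hno : ¬ (x.1 = 0 ∨ x.1 = 3) := by omega
      rw [pvB_loop_cons, if_neg hno, if_pos h1]
      rw [pvA_inner, if_pos h1]
      have := ih res tag (items ++ [(x.2.1, x.2.2, tag)]) (by simp)
        (by cases items with | nil => exact absurd rfl hne | cons a t => simpa using hh)
      simpa [List.append_assoc] using this
    · rw [pvA_inner, if_neg h1]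
      by_cases h03 : x.1 = 0 ∨ x.1 = 3
      · rw [pvB_loop_cons, if_pos h03, pvB_loop_cons, if_pos h03, ← hh]
        simp [pvB_final, pvAddIf]
      · rw [pvB_loop_cons, if_neg h03, if_neg h1, pvB_loop_cons, if_neg h03, if_neg h1, ← hh]
        simp [pvB_final, pvAddIf]

theorem pvB_loop_eq_raw (wanted : List Int) (l : List (Int × Int × Int)) :
    ∀ (res : PySem.Set (List (Int × Int × Int))),
    pvB_loop wanted l res none =
      (pvRaw l).foldl (pvAddIf (fun sp => wanted.contains (sp.headD (0, 0, 0)).2.2)) res := by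
  fun_induction pvRaw l with
  | case1 => intro res; simp [pvB_loop, pvB_final]
  | case2 x rest h tag r ih =>
    intro res
    rw [pvB_loop_cons, if_pos h]
    rw [pvB_loop_some wanted rest (pvB_final wanted res none) _ _ (by simp) (by simp)]
    simp only [pvB_final, List.foldl_cons]
    exact ih _
  | case3 x rest h ih =>
    intro res
    rw [pvB_loop_cons, if_neg h]
    by_cases h1 : x.1 = 1
    · rw [if_pos h1]; exact ih _
    · rw [if_neg h1]; exact ih _

theorem pvAdd_of_mem (s : PySem.Set (List (Int × Int × Int))) (x : List (Int × Int × Int))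
    (h : x ∈ s) : PySem.Set.add s x = s := by
  simp [PySem.Set.add, PySem.Set.contains, h]

theorem pv_mem_foldl_addIf_of_mem (p : List (Int × Int × Int) → Bool)
    (t : List (List (Int × Int × Int))) :
    ∀ (s : PySem.Set (List (Int × Int × Int))) (y : List (Int × Int × Int)),
      y ∈ s → y ∈ t.foldl (pvAddIf p) s := by
  induction t with
  | nil => intro s y h; simpa using h
  | cons a t ih =>
    intro s y h
    simp only [List.foldl_cons]
    apply ih
    unfold pvAddIf
    split
    · exact (PySem.Set.mem_add s a y).mpr (Or.inl h)
    · exact h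

theorem pv_mem_foldl_addIf (p : List (Int × Int × Int) → Bool)
    (t : List (List (Int × Int × Int))) :
    ∀ (s : PySem.Set (List (Int × Int × Int))) (x : List (Int × Int × Int)),
      x ∈ t → p x = true → x ∈ t.foldl (pvAddIf p) s := by
  induction t with
  | nil => intro s x h; simp at h
  | cons a t ih =>
    intro s x h hp
    simp only [List.foldl_cons]
    rcases List.mem_cons.mp h with rfl | h'
    · apply pv_mem_foldl_addIf_of_mem
      simp [pvAddIf, hp, (PySem.Set.mem_add s x x).mpr (Or.inr rfl)]
    · exact ih _ x h' hp

-- filtering after Set.add = conditional add after filtering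
theorem pv_filterFold_add (p : List (Int × Int × Int) → Bool)
    (t : PySem.Set (List (Int × Int × Int))) (x : List (Int × Int × Int)) :
    (PySem.Set.add t x).foldl (pvAddIf p) PySem.Set.empty =
      pvAddIf p (t.foldl (pvAddIf p) PySem.Set.empty) x := by
  by_cases hm : x ∈ t
  · rw [pvAdd_of_mem t x hm, pvAddIf]
    split
    · exact (pvAdd_of_mem _ x (pv_mem_foldl_addIf p t _ x hm (by assumption))).symm
    · rfl
  · rw [PySem.Set.add, if_neg (by simpa [PySem.Set.contains] using hm), List.foldl_append]
    rfl

-- A's filter pass over the collected set = one fused conditional-add pass over the span stream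
theorem pv_filter_fold (p : List (Int × Int × Int) → Bool) (xs : List (List (Int × Int × Int))) :
    ∀ (t : PySem.Set (List (Int × Int × Int))),
    (xs.foldl PySem.Set.add t).foldl (pvAddIf p) PySem.Set.empty =
      xs.foldl (pvAddIf p) (t.foldl (pvAddIf p) PySem.Set.empty) := by
  induction xs with
  | nil => intro t; rfl
  | cons x xs ih =>
    intro t
    simp only [List.foldl_cons]
    rw [ih (PySem.Set.add t x), pv_filterFold_add]

-- every finalized span carries head tag 0 or 3
theorem pvRaw_head (l : List (Int × Int × Int)) :
    ∀ sp ∈ pvRaw l, (sp.headD (0, 0, 0)).2.2 = 0 ∨ (sp.headD (0, 0, 0)).2.2 = 3 := by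
  fun_induction pvRaw l with
  | case1 => simp
  | case2 x rest h tag r ih =>
    intro sp hsp
    rcases List.mem_cons.mp hsp with rfl | h'
    · have htag : tag = 0 ∨ tag = 3 := by
        by_cases h0 : x.1 = 0
        · exact Or.inl (dif_pos h0)
        · exact Or.inr (dif_neg h0)
      simpa using htag
    · exact ih sp h'
  | case3 x rest h ih =>
    exact ih

theorem pv_filter_case (l : List (Int × Int × Int)) (c : Int) :
    (pvA_collect l PySem.Set.empty).foldl
        (fun fs sp => if (sp.headD (0, 0, 0)).2.2 = c then PySem.Set.add fs sp else fs)
        PySem.Set.empty =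
      pvB_loop [c] l PySem.Set.empty none := by
  have hf : (fun fs sp => if (sp.headD (0, 0, 0)).2.2 = c then PySem.Set.add fs sp else fs) =
      pvAddIf (fun sp => ([c] : List Int).contains (sp.headD (0, 0, 0)).2.2) := by
    funext fs sp
    simp [pvAddIf]
  rw [hf, pvA_collect_eq_raw, pvB_loop_eq_raw,
    show ((pvRaw l).foldl PySem.Set.add PySem.Set.empty) =
      (pvRaw l).foldl PySem.Set.add (([] : List (List (Int × Int × Int))).foldl PySem.Set.add PySem.Set.empty) from rfl]
  rw [pv_filter_fold]
  rfl

theorem pv_both_case (l : List (Int × Int × Int)) :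
    pvA_collect l PySem.Set.empty = pvB_loop [0, 3] l PySem.Set.empty none := by
  rw [pvA_collect_eq_raw, pvB_loop_eq_raw]
  refine List.foldl_ext _ _ _ (fun s sp hsp => ?_)
  rcases pvRaw_head l sp hsp with h | h <;>
  · simp only [List.headD_eq_head?_getD] at h
    simp [pvAddIf, List.headD_eq_head?_getD, h]

-- ===== VERDICT (by name: the statement is the Claim_ definition above) =====
theorem find_twostep_tag_aware_spans_spec : Claim_equal_find_twostep_tag_aware_spans := by
  intro l st _ hpre
  unfold Spec_find_twostep_tag_aware_spans
  rcases hpre with rfl | rfl | rfl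
  · simpa [find_twostep_tag_aware_spans, find_twostep_tag_aware_spans_alt] using pv_filter_case l 0
  · simpa [find_twostep_tag_aware_spans, find_twostep_tag_aware_spans_alt] using pv_filter_case l 3
  · simpa [find_twostep_tag_aware_spans, find_twostep_tag_aware_spans_alt] using pv_both_case l
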